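-- pv_equiv track=rewrite | github.com/beh74/pgassistant-community | apps/home/analyze_advisor.py | parse_pg_array_text
-- ===== SOURCE A (Python) =====
-- from typing import Any, Dict, List, Optional
--
-- def parse_pg_array_text(value: Optional[str]) -> Optional[List[str]]:
--     """
--     Parse simple d'un tableau PostgreSQL renvoyé sous forme texte.
--     Ex:
--       "{0.1,0.2,0.3}"
--       "{\"A\",\"B\"}"
--     """
--     if value is None:
--         return None
--
--     value = value.strip()
--     if not value.startswith("{") or not value.endswith("}"):
--         return None
--
--     inner = value[1:-1].strip()
--     if not inner:
--         return []
--
--     result = []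
--     current = []
--     in_quotes = False
--     escape = False
--
--     for ch in inner:
--         if escape:
--             current.append(ch)
--             escape = False
--             continue
--
--         if ch == "\\":
--             escape = True
--             continue
--
--         if ch == '"':
--             in_quotes = not in_quotes
--             continue
--
--         if ch == "," and not in_quotes:
--             result.append("".join(current).strip())
--             current = []
--             continue
--
--         current.append(ch)
--
--     result.append("".join(current).strip())
--     return result
-- ===== SOURCE B (Python) =====
-- from typing import List, Optional
--
--
-- def _unquote(field: str) -> str:
--     """Remove quote characters and resolve backslash escapes in one raw field."""
--     out = []
--     esc = False
--     for ch in field: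
--         if esc:
--             out.append(ch)
--             esc = False
--         elif ch == "\\":
--             esc = True
--         elif ch == '"':
--             pass
--         else:
--             out.append(ch)
--     return "".join(out)
--
--
-- def _split_top_level(inner: str) -> List[str]:
--     """Split inner into raw field substrings at top-level (unquoted, unescaped) commas."""
--     fields = []
--     buf = []
--     in_quotes = False
--     esc = False
--     for ch in inner:
--         if esc:
--             buf.append(ch)
--             esc = False
--         elif ch == "\\":
--             buf.append(ch)
--             esc = True
--         elif ch == '"':
--             buf.append(ch)
--             in_quotes = not in_quotes
--         elif ch == "," and not in_quotes:
--             fields.append("".join(buf))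
--             buf = []
--         else:
--             buf.append(ch)
--     fields.append("".join(buf))
--     return fields
--
--
-- def parse_pg_array_text(value: Optional[str]) -> Optional[List[str]]:
--     if value is None:
--         return None
--     value = value.strip()
--     if not value.startswith("{") or not value.endswith("}"):
--         return None
--     inner = value[1:-1].strip()
--     if not inner:
--         return []
--     return [_unquote(f).strip() for f in _split_top_level(inner)]
-- ===== Notes on version B (the rewrite author's own statement) =====
-- stated objective: alternative
-- what changed: A parses in one inline state loop that unquotes while it splits; B first splits the inner text into raw field substrings at top-level (unquoted, unescaped) commas, then maps a separate unquote routine plus strip over each raw field.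
import Mathlib
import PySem

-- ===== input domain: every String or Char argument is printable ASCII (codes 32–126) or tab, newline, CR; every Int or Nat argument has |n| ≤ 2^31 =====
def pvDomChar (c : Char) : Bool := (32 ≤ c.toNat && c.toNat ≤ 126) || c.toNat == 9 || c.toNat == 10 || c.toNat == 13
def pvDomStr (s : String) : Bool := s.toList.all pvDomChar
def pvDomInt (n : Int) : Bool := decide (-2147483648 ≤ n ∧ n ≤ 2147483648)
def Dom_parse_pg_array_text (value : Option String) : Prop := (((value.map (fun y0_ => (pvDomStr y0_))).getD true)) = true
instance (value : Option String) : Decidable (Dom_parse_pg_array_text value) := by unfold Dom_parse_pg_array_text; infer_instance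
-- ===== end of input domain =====

-- B re-decomposes A's single inline state loop into split-at-top-level-commas + per-field unquote ('alternative'; same cost).

-- ===== PORT A =====
-- the 'for ch in inner' loop of A: state (in_quotes, escape, current, result)
def pvLoopA : List Char → Bool → Bool → List Char → List String → List String
  | [], _inq, _esc, cur, res => res ++ [PySem.Str.strip (String.ofList cur)]
  | ch :: rest, inq, esc, cur, res =>
    if esc then pvLoopA rest inq false (cur ++ [ch]) res
    else if ch = '\\' then pvLoopA rest inq true cur res
    else if ch = '"' then pvLoopA rest (!inq) esc cur res
    else if ch = ',' ∧ inq = false then pvLoopA rest inq esc [] (res ++ [PySem.Str.strip (String.ofList cur)])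
    else pvLoopA rest inq esc (cur ++ [ch]) res

def parse_pg_array_text (value : Option String) : Option (List String) :=
  match value with
  | none => none
  | some value =>
    let v := PySem.Str.strip value
    if !(PySem.Str.startswith v "{") || !(PySem.Str.endswith v "}") then none
    else
      let inner := PySem.Str.strip (PySem.Str.slice v (some 1) (some (-1)))
      if inner = "" then some []
      else some (pvLoopA inner.toList false false [] [])

-- ===== PORT B =====
-- the loop of B's _unquote helper: state (esc, out)
def pvUq : List Char → Bool → List Char → List Char
  | [], _esc, out => out
  | ch :: rest, esc, out =>
    if esc then pvUq rest false (out ++ [ch])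
    else if ch = '\\' then pvUq rest true out
    else if ch = '"' then pvUq rest false out
    else pvUq rest false (out ++ [ch])

def pvUnquote (f : String) : String := String.ofList (pvUq f.toList false [])

-- the loop of B's _split_top_level helper: state (in_quotes, esc, buf, fields); keeps raw chars
def pvSplit : List Char → Bool → Bool → List Char → List String → List String
  | [], _inq, _esc, buf, fields => fields ++ [String.ofList buf]
  | ch :: rest, inq, esc, buf, fields =>
    if esc then pvSplit rest inq false (buf ++ [ch]) fields
    else if ch = '\\' then pvSplit rest inq true (buf ++ [ch]) fields
    else if ch = '"' then pvSplit rest (!inq) esc (buf ++ [ch]) fields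
    else if ch = ',' ∧ inq = false then pvSplit rest inq esc [] (fields ++ [String.ofList buf])
    else pvSplit rest inq esc (buf ++ [ch]) fields

def parse_pg_array_text_alt (value : Option String) : Option (List String) :=
  match value with
  | none => none
  | some value =>
    let v := PySem.Str.strip value
    if !(PySem.Str.startswith v "{") || !(PySem.Str.endswith v "}") then none
    else
      let inner := PySem.Str.strip (PySem.Str.slice v (some 1) (some (-1)))
      if inner = "" then some []
      else some ((pvSplit inner.toList false false [] []).map (fun f => PySem.Str.strip (pvUnquote f)))

-- ===== PRECONDITION & SPEC =====
def Spec_parse_pg_array_text (value : Option String) (out : Option (List String)) : Prop := out = parse_pg_array_text_alt value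
instance (value : Option String) (out : Option (List String)) : Decidable (Spec_parse_pg_array_text value out) := by unfold Spec_parse_pg_array_text; infer_instance

-- ===== CLAIM (what is proved, stated in full; the proofs are below) =====
def Claim_equal_parse_pg_array_text : Prop := ∀ (value : Option String), Dom_parse_pg_array_text value → Spec_parse_pg_array_text value (parse_pg_array_text value)

-- ===== LEMMAS AND PROOFS =====

theorem pvUq_acc (cs : List Char) : ∀ (esc : Bool) (out : List Char),
    pvUq cs esc out = out ++ pvUq cs esc [] := by
  induction cs with
  | nil => intro esc out; simp [pvUq]
  | cons ch rest ih =>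
    intro esc out
    by_cases hesc : esc = true
    · subst hesc
      simp only [pvUq, if_true, List.nil_append]
      rw [ih false (out ++ [ch]), ih false [ch]]
      simp
    · simp only [Bool.not_eq_true] at hesc; subst hesc
      by_cases hbs : ch = '\\'
      · simp only [pvUq, hbs, Bool.false_eq_true, reduceIte]
        exact ih true out
      · by_cases hq : ch = '"'
        · simp only [pvUq, hq, Bool.false_eq_true, reduceIte]
          exact ih false out
        · simp only [pvUq, Bool.false_eq_true, reduceIte, if_neg hbs, if_neg hq, List.nil_append]
          rw [ih false (out ++ [ch]), ih false [ch]]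
          simp

theorem pvLoopA_acc (cs : List Char) : ∀ (inq esc : Bool) (cur : List Char) (res : List String),
    pvLoopA cs inq esc cur res = res ++ pvLoopA cs inq esc cur [] := by
  induction cs with
  | nil => intro inq esc cur res; simp [pvLoopA]
  | cons ch rest ih =>
    intro inq esc cur res
    simp only [pvLoopA, List.nil_append]
    split_ifs <;> try (exact ih ..)
    rw [ih _ _ [] (res ++ _), ih _ _ [] [_]]
    simp

theorem pvSplit_acc (cs : List Char) : ∀ (inq esc : Bool) (buf : List Char) (fields : List String),
    pvSplit cs inq esc buf fields = fields ++ pvSplit cs inq esc buf [] := by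
  induction cs with
  | nil => intro inq esc buf fields; simp [pvSplit]
  | cons ch rest ih =>
    intro inq esc buf fields
    simp only [pvSplit, List.nil_append]
    split_ifs <;> try (exact ih ..)
    rw [ih _ _ [] (fields ++ _), ih _ _ [] [_]]
    simp

-- the unquote state of B's raw buffer matches A's current field, continuably
theorem pvCore (cs : List Char) : ∀ (inq esc : Bool) (cur buf : List Char),
    (∀ more, pvUq (buf ++ more) false [] = cur ++ pvUq more esc []) →
    pvLoopA cs inq esc cur [] =
      (pvSplit cs inq esc buf []).map (fun f => PySem.Str.strip (pvUnquote f)) := by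
  induction cs with
  | nil =>
    intro inq esc cur buf H
    have h0 := H []
    simp [pvUq] at h0
    simp [pvLoopA, pvSplit, pvUnquote, h0]
  | cons ch rest ih =>
    intro inq esc cur buf H
    by_cases hesc : esc = true
    · subst hesc
      simp only [pvLoopA, pvSplit, if_true]
      apply ih
      intro more
      have h := H (ch :: more)
      simp only [pvUq, if_true, List.nil_append] at h
      rw [pvUq_acc more false [ch]] at h
      simpa using h
    · simp only [Bool.not_eq_true] at hesc; subst hesc
      by_cases hbs : ch = '\\'
      · subst hbs
        simp only [pvLoopA, pvSplit, Bool.false_eq_true, reduceIte]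
        apply ih
        intro more
        have h := H ('\\' :: more)
        simpa [pvUq] using h
      · by_cases hq : ch = '"'
        · subst hq
          simp only [pvLoopA, pvSplit, Bool.false_eq_true, reduceIte, if_neg hbs]
          apply ih
          intro more
          have h := H ('"' :: more)
          simpa [pvUq, hbs] using h
        · by_cases hc : ch = ',' ∧ inq = false
          · obtain ⟨hc1, hc2⟩ := hc; subst hc1; subst hc2
            simp only [pvLoopA, pvSplit, Bool.false_eq_true, reduceIte, if_neg hbs, if_neg hq,
              and_true, List.nil_append]
            rw [pvLoopA_acc rest false false [] [_], pvSplit_acc rest false false [] [_]]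
            have h0 := H []
            simp [pvUq] at h0
            simp only [List.map_append, List.map_cons, List.map_nil]
            rw [ih false false [] [] (by intro more; simp)]
            simp [pvUnquote, h0]
          · simp only [pvLoopA, pvSplit, Bool.false_eq_true, reduceIte, if_neg hbs, if_neg hq,
              if_neg hc]
            apply ih
            intro more
            have h := H (ch :: more)
            simp only [pvUq, Bool.false_eq_true, reduceIte, if_neg hbs, if_neg hq,
              List.nil_append] at h
            rw [pvUq_acc more false [ch]] at h
            simpa using h

-- the core loops agree on any inner text
theorem pvTop (inner : List Char) :
    pvLoopA inner false false [] [] =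
      (pvSplit inner false false [] []).map (fun f => PySem.Str.strip (pvUnquote f)) :=
  pvCore inner false false [] [] (by intro more; simp)

-- ===== VERDICT (by name: the statement is the Claim_ definition above) =====
theorem parse_pg_array_text_spec : Claim_equal_parse_pg_array_text := by
  intro value _
  unfold Spec_parse_pg_array_text
  cases value with
  | none => rfl
  | some s => simp only [parse_pg_array_text, parse_pg_array_text_alt, pvTop]
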